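-- pv_equiv track=rewrite | github.com/jimmygizmo/pyrithm | pyrithm/generator/flip_flop.py | binary_flip_flop_generator
-- ===== SOURCE A (Python) =====
-- def binary_flip_flop_generator(max_flip_flops=0):
--     # TODO: Make the docstring more according to PEP8, multi-line.
--     """Generate an iterator which returns alternating values of 0 or 1 up to the maximum of
--     max_flip_flops times, with the ability to iterate an unlimited number of times. If not specified,
--     the max is infinite/unlimited iterations, which is specified by setting max_flip_flops to 0. The
--     first value returned will be 0. If a non-zero max is specified and is then exceeded, the standard
--     iterator exception of StopIteration will be raised.
--     """
--     # Initialize iterator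
--     state = 1
--     count = 0
--     iterate = True
--
--     # Iteration logic for this generator
--     while iterate:
--         if state == 1:
--             state = 0
--         else:
--             state = 1
--         count += 1
--         if not (max_flip_flops == 0):
--             if (count >= max_flip_flops):
--                 iterate = False
--         yield state
-- ===== SOURCE B (Python) =====
-- def binary_flip_flop_generator(max_flip_flops=0):
--     # Bulk construction instead of a per-element toggle loop: materialize the
--     # whole alternating sequence as ([0, 1] * ceil(max/2))[:max] and yield from it.
--     if max_flip_flops == 0:
--         while True:
--             yield 0
--             yield 1
--     else:
--         yield from ([0, 1] * ((max_flip_flops + 1) // 2))[:max_flip_flops]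
-- ===== Notes on version B (the rewrite author's own statement) =====
-- stated objective: alternative
-- what changed: Replaces A's per-element toggle-state/count/flag do-while loop with bulk construction: dispatch on max==0 to an unconditional infinite 0/1 loop, otherwise build the whole sequence at once as ([0,1] * ceil(max/2))[:max] and yield from it.
-- intended difference: For negative max_flip_flops A's do-while structure still emits one value [0] before its stop check fires, while B yields nothing, which is the intended meaning of 'up to a maximum of max_flip_flops values'. — e.g. on binary_flip_flop_generator(-1): A returns [0], B returns []
import Mathlib
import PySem

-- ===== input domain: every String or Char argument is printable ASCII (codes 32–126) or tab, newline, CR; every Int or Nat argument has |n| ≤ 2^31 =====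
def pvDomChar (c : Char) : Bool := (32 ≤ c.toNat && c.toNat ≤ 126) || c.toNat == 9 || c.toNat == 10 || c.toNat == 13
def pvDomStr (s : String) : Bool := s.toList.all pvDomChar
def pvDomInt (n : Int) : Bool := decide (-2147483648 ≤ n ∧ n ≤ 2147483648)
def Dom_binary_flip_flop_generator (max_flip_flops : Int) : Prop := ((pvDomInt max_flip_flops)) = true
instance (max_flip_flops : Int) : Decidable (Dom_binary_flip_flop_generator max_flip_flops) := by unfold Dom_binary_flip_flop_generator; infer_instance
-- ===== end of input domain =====

-- B replaces A's per-element toggle/count/flag do-while loop with bulk construction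
-- ([0,1] * ceil(max/2))[:max] (alternative decomposition; B yields nothing for negative
-- max — stated as D_ below).

-- ===== PORT A =====
-- A's while loop: state toggles, count increments, iterate flag cleared when count reaches
-- a non-zero max. Fuel (max.toNat + 1) only makes the recursion total; it covers every
-- terminating run of A (max iterations when max > 0, one iteration when max < 0).
def bffLoopA : Nat → Int → Int → Int → List Int
  | 0, _, _, _ => []
  | fuel + 1, max_flip_flops, state, count =>
      let state' : Int := if state = 1 then 0 else 1
      let count' : Int := count + 1
      let iterate' : Bool :=
        if ¬ (max_flip_flops = 0) ∧ count' ≥ max_flip_flops then false else true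
      state' :: (if iterate' then bffLoopA fuel max_flip_flops state' count' else [])

def binary_flip_flop_generator (max_flip_flops : Int) : List Int :=
  bffLoopA (max_flip_flops.toNat + 1) max_flip_flops 1 0

-- ===== PORT B =====
-- B: if max == 0 the Python generator is an unconditional infinite 0/1 loop (never returns
-- a finite list; excluded by Pre_, so that branch is [] here); otherwise it yields the
-- bulk list ([0,1] * ((max+1)//2))[:max]. Python's 'list * n' with n ≤ 0 is [] — matched
-- by .toNat on the repetition count.
def binary_flip_flop_generator_alt (max_flip_flops : Int) : List Int :=
  if max_flip_flops = 0 then []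
  else PySem.List.slice
    (List.flatten (List.replicate (PySem.Int.floordiv (max_flip_flops + 1) 2).toNat [0, 1]))
    none (some max_flip_flops)

-- ===== PRECONDITION & SPEC =====
-- Pre_ excludes max_flip_flops = 0, on which the Python generator is infinite (A never
-- returns a finite list there).
def Pre_binary_flip_flop_generator (max_flip_flops : Int) : Prop := max_flip_flops ≠ 0
instance (max_flip_flops : Int) : Decidable (Pre_binary_flip_flop_generator max_flip_flops) := by
  unfold Pre_binary_flip_flop_generator; infer_instance

def pvWitness_binary_flip_flop_generator : Int := 3

-- For negative max_flip_flops A's do-while structure still emits one value [0] before its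
-- stop check fires, while B yields nothing, which is the intended meaning of 'up to a
-- maximum of max_flip_flops values'.
def D_binary_flip_flop_generator (max_flip_flops : Int) : Prop := max_flip_flops < 0
instance (max_flip_flops : Int) : Decidable (D_binary_flip_flop_generator max_flip_flops) := by
  unfold D_binary_flip_flop_generator; infer_instance

def Spec_binary_flip_flop_generator (max_flip_flops : Int) (out : List Int) : Prop :=
  ¬ D_binary_flip_flop_generator max_flip_flops → out = binary_flip_flop_generator_alt max_flip_flops
instance (max_flip_flops : Int) (out : List Int) : Decidable (Spec_binary_flip_flop_generator max_flip_flops out) := by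
  unfold Spec_binary_flip_flop_generator; infer_instance

def pvDiffWitness_binary_flip_flop_generator : Int := -1
def pvDiffWitnessOut_binary_flip_flop_generator : (List Int) × (List Int) := ([0], [])

-- ===== CLAIM (what is proved, stated in full; the proofs are below) =====
def Claim_unchanged_binary_flip_flop_generator : Prop := ∀ (max_flip_flops : Int), Dom_binary_flip_flop_generator max_flip_flops → Pre_binary_flip_flop_generator max_flip_flops → Spec_binary_flip_flop_generator max_flip_flops (binary_flip_flop_generator max_flip_flops)
def Claim_changed_binary_flip_flop_generator : Prop := Dom_binary_flip_flop_generator (pvDiffWitness_binary_flip_flop_generator) ∧ Pre_binary_flip_flop_generator (pvDiffWitness_binary_flip_flop_generator) ∧ D_binary_flip_flop_generator (pvDiffWitness_binary_flip_flop_generator) ∧ binary_flip_flop_generator (pvDiffWitness_binary_flip_flop_generator) = pvDiffWitnessOut_binary_flip_flop_generator.1 ∧ binary_flip_flop_generator_alt (pvDiffWitness_binary_flip_flop_generator) = pvDiffWitnessOut_binary_flip_flop_generator.2 ∧ pvDiffWitnessOut_binary_flip_flop_generator.1 ≠ pvDiffWitnessOut_binary_flip_flop_generator.2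
def Claim_exact_binary_flip_flop_generator : Prop := ∀ (max_flip_flops : Int), Dom_binary_flip_flop_generator max_flip_flops → Pre_binary_flip_flop_generator max_flip_flops → D_binary_flip_flop_generator max_flip_flops → binary_flip_flop_generator max_flip_flops ≠ binary_flip_flop_generator_alt max_flip_flops

-- ===== LEMMAS AND PROOFS =====

-- Common reference: the alternating parity list [c % 2, (c+1) % 2, …] of length k.
def pvPat : Nat → Int → List Int
  | 0, _ => []
  | k + 1, c => c % 2 :: pvPat k (c + 1)

lemma pvPat_congr (k : Nat) : ∀ c c' : Int, c % 2 = c' % 2 → pvPat k c = pvPat k c' := by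
  induction k with
  | zero => intro _ _ _; rfl
  | succ j ih =>
    intro c c' h
    simp only [pvPat, h]
    exact congrArg _ (ih (c + 1) (c' + 1) (by omega))

lemma pvPat_take (k : Nat) : ∀ (c : Int) (n : Nat), (pvPat k c).take n = pvPat (min n k) c := by
  induction k with
  | zero => intro c n; simp [pvPat]
  | succ j ih =>
    intro c n
    cases n with
    | zero => simp [pvPat]
    | succ m =>
      simp only [pvPat, List.take_succ_cons, ih]
      have : min (m + 1) (j + 1) = min m j + 1 := by omega
      rw [this]
      rfl

lemma pvFlat (j : Nat) : List.flatten (List.replicate j ([0, 1] : List Int)) = pvPat (2 * j) 0 := by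
  induction j with
  | zero => rfl
  | succ i ih =>
    rw [List.replicate_succ, List.flatten_cons, ih]
    have h2 : 2 * (i + 1) = (2 * i + 1) + 1 := by omega
    rw [h2]
    show [0, 1] ++ pvPat (2 * i) 0 = (0 : Int) % 2 :: pvPat (2 * i + 1) (0 + 1)
    simp only [pvPat, List.cons_append, List.nil_append]
    norm_num
    exact pvPat_congr (2 * i) 0 2 (by norm_num)

lemma bffLoopA_pat (k : Nat) : ∀ (fuel : Nat) (max c : Int),
    0 ≤ c → max = c + k → 1 ≤ k → k ≤ fuel →
    bffLoopA fuel max ((c + 1) % 2) c = pvPat k c := by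
  induction k with
  | zero => omega
  | succ j ih =>
    intro fuel max c hc hmax _ hfuel
    obtain ⟨f, rfl⟩ : ∃ f, fuel = f + 1 := ⟨fuel - 1, by omega⟩
    show (if ((c + 1) % 2 : Int) = 1 then (0:Int) else 1) ::
        (if (if ¬ (max = 0) ∧ c + 1 ≥ max then false else true) = true then
          bffLoopA f max (if ((c + 1) % 2 : Int) = 1 then 0 else 1) (c + 1) else []) = pvPat (j+1) c
    have hstate : (if ((c + 1) % 2 : Int) = 1 then (0:Int) else 1) = c % 2 := by
      split_ifs with h <;> omega
    rcases Nat.eq_zero_or_pos j with hj | hj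
    · subst hj
      have hstop : (if ¬ (max = 0) ∧ c + 1 ≥ max then false else true) = false := by
        push_cast at hmax; rw [if_pos]; exact ⟨by omega, by omega⟩
      rw [hstate, hstop]; simp [pvPat]
    · have hgo : (if ¬ (max = 0) ∧ c + 1 ≥ max then false else true) = true := by
        push_cast at hmax; rw [if_neg]; rintro ⟨-, h2⟩; omega
      rw [hstate, hgo]
      simp only [pvPat]
      congr 1
      have : ((c + 1 + 1) % 2 : Int) = c % 2 := by omega
      rw [← this]
      exact ih f max (c + 1) (by omega) (by push_cast at hmax ⊢; omega) hj (by omega)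

-- ===== VERDICT (by name: the statement is the Claim_ definitions above) =====
theorem binary_flip_flop_generator_spec : Claim_unchanged_binary_flip_flop_generator := by
  intro max hdom hpre hnd
  have hpos : 0 < max := by
    unfold Pre_binary_flip_flop_generator at hpre
    unfold D_binary_flip_flop_generator at hnd
    omega
  have hk : max = (0 : Int) + (max.toNat : Int) := by omega
  unfold binary_flip_flop_generator binary_flip_flop_generator_alt
  conv_lhs =>
    rw [show (1 : Int) = ((0 : Int) + 1) % 2 by norm_num,
      bffLoopA_pat max.toNat (max.toNat + 1) max 0 le_rfl hk (by omega) (by omega)]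
  rw [if_neg (by omega), pvFlat]
  have hmn : max = ((max.toNat : Nat) : Int) := by omega
  rw [hmn, PySem.List.slice_to_natCast, pvPat_take]
  have hdm := Int.mul_fdiv_add_fmod (max + 1) 2
  have hm : (max + 1).fmod 2 = (max + 1) % 2 := by rw [Int.fmod_eq_emod]; simp
  have hceil : max.toNat ≤ 2 * (PySem.Int.floordiv (max + 1) 2).toNat := by
    simp only [PySem.Int.floordiv]
    omega
  rw [Int.toNat_natCast, ← hmn, min_eq_left hceil]

theorem binary_flip_flop_generator_changed : Claim_changed_binary_flip_flop_generator := by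
  unfold Claim_changed_binary_flip_flop_generator; decide

theorem binary_flip_flop_generator_tight : Claim_exact_binary_flip_flop_generator := by
  intro max _ _ hd
  unfold D_binary_flip_flop_generator at hd
  have ht : max.toNat = 0 := by omega
  have hrep : (PySem.Int.floordiv (max + 1) 2).toNat = 0 := by
    simp only [PySem.Int.floordiv]
    have hdm := Int.mul_fdiv_add_fmod (max + 1) 2
    have hm : (max + 1).fmod 2 = (max + 1) % 2 := by rw [Int.fmod_eq_emod]; simp
    omega
  unfold binary_flip_flop_generator binary_flip_flop_generator_alt
  rw [ht, hrep, if_neg (by omega)]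
  simp [bffLoopA, PySem.List.slice]
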